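-- pv_equiv track=rewrite | github.com/CesarManzoCode/StudyFlow | app/application/services/day_planning_service.py | _estimate_minutes_from_description
-- ===== SOURCE A (Python) =====
-- def _estimate_minutes_from_description(description: str) -> int:
--     """
--     Heuristic time estimation based on description keywords.
--     """
--     description_lower = description.lower()
--
--     # Keywords for different durations
--     short_keywords = ["write", "review", "check", "read", "edit"]
--     medium_keywords = ["create", "design", "analyze", "research", "implement"]
--     long_keywords = ["develop", "comprehensive", "project", "build", "system"]
--
--     for kw in long_keywords:
--         if kw in description_lower:
--             return 120  # 2 hours
--
--     for kw in medium_keywords: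
--         if kw in description_lower:
--             return 60  # 1 hour
--
--     for kw in short_keywords:
--         if kw in description_lower:
--             return 30  # 30 min
--
--     # Default for unclear descriptions
--     return 45  # 45 min
-- ===== SOURCE B (Python) =====
-- _KEYWORD_MINUTES = [
--     ("develop", 120), ("comprehensive", 120), ("project", 120), ("build", 120), ("system", 120),
--     ("create", 60), ("design", 60), ("analyze", 60), ("research", 60), ("implement", 60),
--     ("write", 30), ("review", 30), ("check", 30), ("read", 30), ("edit", 30),
-- ]
--
--
-- def _estimate_minutes_from_description(description: str) -> int:
--     d = description.lower()
--     matched = [minutes for kw, minutes in _KEYWORD_MINUTES if kw in d]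
--     return max(matched) if matched else 45
-- ===== Notes on version B (the rewrite author's own statement) =====
-- stated objective: simpler
-- what changed: Replaced the three ordered short-circuiting priority loops by one flat (keyword, minutes) table scanned exhaustively, returning the max of all matched minute values (default 45); exact because priority order coincides with descending minute value.
import Mathlib
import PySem

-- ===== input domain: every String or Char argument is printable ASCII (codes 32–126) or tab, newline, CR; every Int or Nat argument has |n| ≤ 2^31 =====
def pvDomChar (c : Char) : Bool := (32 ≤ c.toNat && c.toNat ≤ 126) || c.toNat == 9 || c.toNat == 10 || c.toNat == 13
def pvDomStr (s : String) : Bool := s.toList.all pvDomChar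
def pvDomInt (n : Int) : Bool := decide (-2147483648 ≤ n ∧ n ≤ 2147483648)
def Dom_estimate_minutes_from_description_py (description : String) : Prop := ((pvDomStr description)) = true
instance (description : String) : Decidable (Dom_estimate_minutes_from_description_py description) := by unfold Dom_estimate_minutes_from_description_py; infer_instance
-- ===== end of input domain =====

-- B replaces A's three ordered short-circuiting keyword loops by one flat keyword→minutes
-- table scanned exhaustively with a max aggregation (objective: simpler).


-- ===== PORT A =====
def estimate_minutes_from_description_py (description : String) : Int :=
  let description_lower := PySem.Str.lower description
  let short_keywords := ["write", "review", "check", "read", "edit"]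
  let medium_keywords := ["create", "design", "analyze", "research", "implement"]
  let long_keywords := ["develop", "comprehensive", "project", "build", "system"]
  -- each Python loop returns a constant on the first match: 'for kw …: if kw in …: return c' = any
  if long_keywords.any (fun kw => PySem.Str.isIn kw description_lower) then 120
  else if medium_keywords.any (fun kw => PySem.Str.isIn kw description_lower) then 60
  else if short_keywords.any (fun kw => PySem.Str.isIn kw description_lower) then 30
  else 45

-- ===== PORT B =====
def pvKwTable : List (String × Int) :=
  [("develop", 120), ("comprehensive", 120), ("project", 120), ("build", 120), ("system", 120),
   ("create", 60), ("design", 60), ("analyze", 60), ("research", 60), ("implement", 60),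
   ("write", 30), ("review", 30), ("check", 30), ("read", 30), ("edit", 30)]

def estimate_minutes_from_description_py_alt (description : String) : Int :=
  let d := PySem.Str.lower description
  let matched := (pvKwTable.filter (fun p => PySem.Str.isIn p.1 d)).map Prod.snd
  match PySem.List.max? matched (fun x => x) with
  | some m => m
  | none => 45

-- ===== PRECONDITION & SPEC =====
def Spec_estimate_minutes_from_description_py (description : String) (out : Int) : Prop := out = estimate_minutes_from_description_py_alt description
instance (description : String) (out : Int) : Decidable (Spec_estimate_minutes_from_description_py description out) := by unfold Spec_estimate_minutes_from_description_py; infer_instance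

-- ===== CLAIM (what is proved, stated in full; the proofs are below) =====
def Claim_equal_estimate_minutes_from_description_py : Prop := ∀ (description : String), Dom_estimate_minutes_from_description_py description → Spec_estimate_minutes_from_description_py description (estimate_minutes_from_description_py description)

-- ===== LEMMAS AND PROOFS =====

-- matched list of B, as a standalone function for the lemmas
def pvMatched (d : String) : List Int :=
  (pvKwTable.filter (fun p => PySem.Str.isIn p.1 (PySem.Str.lower d))).map Prod.snd

theorem pvAlt_eq_matched (d : String) :
    estimate_minutes_from_description_py_alt d =
      match PySem.List.max? (pvMatched d) (fun x => x) with
      | some m => m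
      | none => 45 := rfl

theorem pvMem_matched (d : String) (p : String × Int) (hp : p ∈ pvKwTable)
    (hf : PySem.Str.isIn p.1 (PySem.Str.lower d) = true) : p.2 ∈ pvMatched d := by
  exact List.mem_map.2 ⟨p, List.mem_filter.2 ⟨hp, hf⟩, rfl⟩

theorem pvMatched_mem (d : String) (y : Int) (hy : y ∈ pvMatched d) :
    ∃ p ∈ pvKwTable, PySem.Str.isIn p.1 (PySem.Str.lower d) = true ∧ y = p.2 := by
  rcases List.mem_map.1 hy with ⟨p, hp, rfl⟩
  rcases List.mem_filter.1 hp with ⟨hmem, hf⟩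
  exact ⟨p, hmem, hf, rfl⟩

theorem pvMax?_eq_of (xs : List Int) (m : Int) (h1 : m ∈ xs) (h2 : ∀ y ∈ xs, y ≤ m) :
    PySem.List.max? xs (fun x => x) = some m := by
  cases hx : PySem.List.max? xs (fun x => x) with
  | none =>
    have : xs = [] := (PySem.List.max?_eq_none_iff xs (fun x => x)).1 hx
    simp [this] at h1
  | some m' =>
    have hmem := PySem.List.max?_mem hx
    have hle : m ≤ m' := PySem.List.max?_isMax hx m h1
    have hge : m' ≤ m := h2 m' hmem
    exact congrArg some (le_antisymm hge hle)

-- the three group booleans of A, evaluated against B's matched list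
theorem pvAlt_long (d : String)
    (hL : (["develop", "comprehensive", "project", "build", "system"].any
      (fun kw => PySem.Str.isIn kw (PySem.Str.lower d))) = true) :
    estimate_minutes_from_description_py_alt d = 120 := by
  rw [pvAlt_eq_matched]
  have h120 : (120 : Int) ∈ pvMatched d := by
    rcases List.any_eq_true.1 hL with ⟨kw, hkw, hf⟩
    simp only [List.mem_cons, List.not_mem_nil, or_false] at hkw
    rcases hkw with rfl | rfl | rfl | rfl | rfl
    · exact pvMem_matched d ("develop", 120) (by decide) hf
    · exact pvMem_matched d ("comprehensive", 120) (by decide) hf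
    · exact pvMem_matched d ("project", 120) (by decide) hf
    · exact pvMem_matched d ("build", 120) (by decide) hf
    · exact pvMem_matched d ("system", 120) (by decide) hf
  have hub : ∀ y ∈ pvMatched d, y ≤ 120 := by
    intro y hy
    rcases pvMatched_mem d y hy with ⟨p, hp, _, rfl⟩
    simp only [pvKwTable, List.mem_cons, List.not_mem_nil, or_false] at hp
    rcases hp with rfl|rfl|rfl|rfl|rfl|rfl|rfl|rfl|rfl|rfl|rfl|rfl|rfl|rfl|rfl <;> norm_num
  rw [pvMax?_eq_of _ _ h120 hub]

theorem pvAlt_medium (d : String)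
    (hL : (["develop", "comprehensive", "project", "build", "system"].any
      (fun kw => PySem.Str.isIn kw (PySem.Str.lower d))) = false)
    (hM : (["create", "design", "analyze", "research", "implement"].any
      (fun kw => PySem.Str.isIn kw (PySem.Str.lower d))) = true) :
    estimate_minutes_from_description_py_alt d = 60 := by
  rw [pvAlt_eq_matched]
  have h60 : (60 : Int) ∈ pvMatched d := by
    rcases List.any_eq_true.1 hM with ⟨kw, hkw, hf⟩
    simp only [List.mem_cons, List.not_mem_nil, or_false] at hkw
    rcases hkw with rfl | rfl | rfl | rfl | rfl
    · exact pvMem_matched d ("create", 60) (by decide) hf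
    · exact pvMem_matched d ("design", 60) (by decide) hf
    · exact pvMem_matched d ("analyze", 60) (by decide) hf
    · exact pvMem_matched d ("research", 60) (by decide) hf
    · exact pvMem_matched d ("implement", 60) (by decide) hf
  have hub : ∀ y ∈ pvMatched d, y ≤ 60 := by
    intro y hy
    rcases pvMatched_mem d y hy with ⟨p, hp, hf, rfl⟩
    simp only [List.any_eq_false, List.mem_cons, List.not_mem_nil, or_false,
      forall_eq_or_imp, forall_eq] at hL
    simp only [pvKwTable, List.mem_cons, List.not_mem_nil, or_false] at hp
    rcases hp with rfl|rfl|rfl|rfl|rfl|rfl|rfl|rfl|rfl|rfl|rfl|rfl|rfl|rfl|rfl <;>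
      simp_all
  rw [pvMax?_eq_of _ _ h60 hub]

theorem pvAlt_short (d : String)
    (hL : (["develop", "comprehensive", "project", "build", "system"].any
      (fun kw => PySem.Str.isIn kw (PySem.Str.lower d))) = false)
    (hM : (["create", "design", "analyze", "research", "implement"].any
      (fun kw => PySem.Str.isIn kw (PySem.Str.lower d))) = false)
    (hS : (["write", "review", "check", "read", "edit"].any
      (fun kw => PySem.Str.isIn kw (PySem.Str.lower d))) = true) :
    estimate_minutes_from_description_py_alt d = 30 := by
  rw [pvAlt_eq_matched]
  have h30 : (30 : Int) ∈ pvMatched d := by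
    rcases List.any_eq_true.1 hS with ⟨kw, hkw, hf⟩
    simp only [List.mem_cons, List.not_mem_nil, or_false] at hkw
    rcases hkw with rfl | rfl | rfl | rfl | rfl
    · exact pvMem_matched d ("write", 30) (by decide) hf
    · exact pvMem_matched d ("review", 30) (by decide) hf
    · exact pvMem_matched d ("check", 30) (by decide) hf
    · exact pvMem_matched d ("read", 30) (by decide) hf
    · exact pvMem_matched d ("edit", 30) (by decide) hf
  have hub : ∀ y ∈ pvMatched d, y ≤ 30 := by
    intro y hy
    rcases pvMatched_mem d y hy with ⟨p, hp, hf, rfl⟩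
    simp only [List.any_eq_false, List.mem_cons, List.not_mem_nil, or_false,
      forall_eq_or_imp, forall_eq] at hL hM
    simp only [pvKwTable, List.mem_cons, List.not_mem_nil, or_false] at hp
    rcases hp with rfl|rfl|rfl|rfl|rfl|rfl|rfl|rfl|rfl|rfl|rfl|rfl|rfl|rfl|rfl <;>
      simp_all
  rw [pvMax?_eq_of _ _ h30 hub]

theorem pvAlt_none (d : String)
    (hL : (["develop", "comprehensive", "project", "build", "system"].any
      (fun kw => PySem.Str.isIn kw (PySem.Str.lower d))) = false)
    (hM : (["create", "design", "analyze", "research", "implement"].any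
      (fun kw => PySem.Str.isIn kw (PySem.Str.lower d))) = false)
    (hS : (["write", "review", "check", "read", "edit"].any
      (fun kw => PySem.Str.isIn kw (PySem.Str.lower d))) = false) :
    estimate_minutes_from_description_py_alt d = 45 := by
  rw [pvAlt_eq_matched]
  have hempty : pvMatched d = [] := by
    unfold pvMatched
    rw [List.map_eq_nil_iff, List.filter_eq_nil_iff]
    intro p hp
    simp only [List.any_eq_false, List.mem_cons, List.not_mem_nil, or_false,
      forall_eq_or_imp, forall_eq] at hL hM hS
    simp only [pvKwTable, List.mem_cons, List.not_mem_nil, or_false] at hp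
    rcases hp with rfl|rfl|rfl|rfl|rfl|rfl|rfl|rfl|rfl|rfl|rfl|rfl|rfl|rfl|rfl <;>
      simp_all
  rw [hempty]
  simp [PySem.List.max?]

-- ===== VERDICT (by name: the statement is the Claim_ definition above) =====
theorem estimate_minutes_from_description_py_spec : Claim_equal_estimate_minutes_from_description_py := by
  intro d _
  unfold Spec_estimate_minutes_from_description_py estimate_minutes_from_description_py
  cases hL : (["develop", "comprehensive", "project", "build", "system"].any
      (fun kw => PySem.Str.isIn kw (PySem.Str.lower d))) with
  | true => rw [if_pos hL, pvAlt_long d hL]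
  | false =>
    cases hM : (["create", "design", "analyze", "research", "implement"].any
        (fun kw => PySem.Str.isIn kw (PySem.Str.lower d))) with
    | true => rw [if_neg (by rw [hL]; decide), if_pos hM, pvAlt_medium d hL hM]
    | false =>
      cases hS : (["write", "review", "check", "read", "edit"].any
          (fun kw => PySem.Str.isIn kw (PySem.Str.lower d))) with
      | true =>
        rw [if_neg (by rw [hL]; decide), if_neg (by rw [hM]; decide), if_pos hS, pvAlt_short d hL hM hS]
      | false =>
        rw [if_neg (by rw [hL]; decide), if_neg (by rw [hM]; decide), if_neg (by rw [hS]; decide),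
          pvAlt_none d hL hM hS]
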